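-- pv_equiv track=rewrite | github.com/practual/cartographers | game.py | borderlands
-- ===== SOURCE A (Python) =====
-- def borderlands(coords_to_terrain, terrain_to_coords):
--     filled_coords = set(coords_to_terrain.keys())
--     score = 0
--     for row in range(11):
--         row_coords = {(x, row) for x in range(11)}
--         if not len(row_coords - filled_coords):
--             score += 6
--     for col in range(11):
--         col_coords = {(col, y) for y in range(11)}
--         if not len(col_coords - filled_coords):
--             score += 6
--     return score
-- ===== SOURCE B (Python) =====
-- def borderlands(coords_to_terrain, terrain_to_coords):
--     col_counts = {}
--     row_counts = {}
--     for x, y in coords_to_terrain: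
--         if 0 <= x <= 10 and 0 <= y <= 10:
--             col_counts[x] = col_counts.get(x, 0) + 1
--             row_counts[y] = row_counts.get(y, 0) + 1
--     score = 0
--     for i in range(11):
--         if row_counts.get(i, 0) == 11:
--             score += 6
--         if col_counts.get(i, 0) == 11:
--             score += 6
--     return score
-- ===== Notes on version B (the rewrite author's own statement) =====
-- stated objective: alternative
-- what changed: Instead of building the 11-cell set for each of the 22 rows/columns and testing set subtraction against the filled-coordinate set, B makes one pass over the coordinate keys tallying per-row and per-column counts in two dictionaries and scores 6 for every index whose count is 11.
import Mathlib
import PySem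

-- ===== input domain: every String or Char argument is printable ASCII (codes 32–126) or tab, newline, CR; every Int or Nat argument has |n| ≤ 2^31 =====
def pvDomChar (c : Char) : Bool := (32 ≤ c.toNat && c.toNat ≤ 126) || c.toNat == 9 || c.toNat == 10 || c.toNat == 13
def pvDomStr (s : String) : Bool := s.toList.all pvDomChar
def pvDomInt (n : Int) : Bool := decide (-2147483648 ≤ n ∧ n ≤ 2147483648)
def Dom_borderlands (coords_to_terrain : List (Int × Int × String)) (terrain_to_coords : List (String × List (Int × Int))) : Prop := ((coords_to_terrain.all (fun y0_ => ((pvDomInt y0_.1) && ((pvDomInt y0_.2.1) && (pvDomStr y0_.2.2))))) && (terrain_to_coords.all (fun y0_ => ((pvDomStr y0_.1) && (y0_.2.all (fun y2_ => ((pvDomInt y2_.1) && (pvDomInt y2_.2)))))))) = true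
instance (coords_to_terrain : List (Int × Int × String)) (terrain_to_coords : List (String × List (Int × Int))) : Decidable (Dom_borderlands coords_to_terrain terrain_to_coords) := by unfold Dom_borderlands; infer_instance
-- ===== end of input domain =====

-- B replaces A's 242 per-cell set subtractions by one counting pass over the filled
-- coordinates (row/column tally dictionaries); objective: alternative algorithm.


-- ===== PORT A =====
-- filled_coords = set(coords_to_terrain.keys()); two loops over range(11); each checks
-- `not len(row_coords - filled_coords)` for the 11-cell row/column set comprehension.
def borderlands (coords_to_terrain : List (Int × Int × String)) (terrain_to_coords : List (String × List (Int × Int))) : Int :=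
  let filled_coords : PySem.Set (Int × Int) :=
    PySem.Set.ofList (coords_to_terrain.map (fun t => (t.1, t.2.1)))
  let score : Int := (PySem.List.pyRange 0 11 1).foldl (fun score row =>
    let row_coords : PySem.Set (Int × Int) :=
      PySem.Set.ofList ((PySem.List.pyRange 0 11 1).map (fun x => (x, row)))
    if PySem.Set.len (PySem.Set.diff row_coords filled_coords) = 0 then score + 6 else score) 0
  let score : Int := (PySem.List.pyRange 0 11 1).foldl (fun score col =>
    let col_coords : PySem.Set (Int × Int) :=
      PySem.Set.ofList ((PySem.List.pyRange 0 11 1).map (fun y => (col, y)))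
    if PySem.Set.len (PySem.Set.diff col_coords filled_coords) = 0 then score + 6 else score) score
  score

-- ===== PORT B =====
-- `for x, y in coords_to_terrain` iterates the dict's keys: the first occurrences of the
-- key projections, i.e. PySem.List.dedup of the keys; one counting pass builds the two
-- tally dicts, then one loop over range(11) scores rows and columns.
def borderlands_alt (coords_to_terrain : List (Int × Int × String)) (terrain_to_coords : List (String × List (Int × Int))) : Int :=
  let keys := PySem.List.dedup (coords_to_terrain.map (fun t => (t.1, t.2.1)))
  let counts := keys.foldl (fun (counts : PySem.Dict Int Int × PySem.Dict Int Int) k =>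
      if (0 ≤ k.1 ∧ k.1 ≤ 10) ∧ (0 ≤ k.2 ∧ k.2 ≤ 10) then
        (counts.1.insert k.1 (counts.1.getD k.1 0 + 1),
         counts.2.insert k.2 (counts.2.getD k.2 0 + 1))
      else counts) (PySem.Dict.empty, PySem.Dict.empty)
  (PySem.List.pyRange 0 11 1).foldl (fun score i =>
    let score := if counts.2.getD i 0 = 11 then score + 6 else score
    if counts.1.getD i 0 = 11 then score + 6 else score) 0

-- ===== PRECONDITION & SPEC =====
def Spec_borderlands (coords_to_terrain : List (Int × Int × String)) (terrain_to_coords : List (String × List (Int × Int))) (out : Int) : Prop := out = borderlands_alt coords_to_terrain terrain_to_coords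
instance (coords_to_terrain : List (Int × Int × String)) (terrain_to_coords : List (String × List (Int × Int))) (out : Int) : Decidable (Spec_borderlands coords_to_terrain terrain_to_coords out) := by unfold Spec_borderlands; infer_instance

-- ===== CLAIM (what is proved, stated in full; the proofs are below) =====
def Claim_equal_borderlands : Prop := ∀ (coords_to_terrain : List (Int × Int × String)) (terrain_to_coords : List (String × List (Int × Int))), Dom_borderlands coords_to_terrain terrain_to_coords → Spec_borderlands coords_to_terrain terrain_to_coords (borderlands coords_to_terrain terrain_to_coords)

-- ===== LEMMAS AND PROOFS =====

-- the in-grid test of B as a Bool predicate (proof-side abbreviation only)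
def pvInb (k : Int × Int) : Bool := decide ((0 ≤ k.1 ∧ k.1 ≤ 10) ∧ (0 ≤ k.2 ∧ k.2 ≤ 10))

theorem pv_foldl_if6 (p : Int → Prop) [DecidablePred p] :
    ∀ (l : List Int) (a : Int),
      l.foldl (fun acc x => if p x then acc + 6 else acc) a
        = a + 6 * (l.countP (fun x => decide (p x)) : Int) := by
  intro l
  induction l with
  | nil => intro a; simp
  | cons x xs ih =>
    intro a
    simp only [List.foldl_cons, List.countP_cons, ih]
    by_cases h : p x <;> simp [h] <;> ring

theorem pv_foldl_if6_pair (p q : Int → Prop) [DecidablePred p] [DecidablePred q] :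
    ∀ (l : List Int) (a : Int),
      l.foldl (fun acc i =>
          if q i then (if p i then acc + 6 else acc) + 6
          else (if p i then acc + 6 else acc)) a
        = a + 6 * (l.countP (fun x => decide (p x)) : Int)
            + 6 * (l.countP (fun x => decide (q x)) : Int) := by
  intro l
  induction l with
  | nil => intro a; simp
  | cons x xs ih =>
    intro a
    simp only [List.foldl_cons, List.countP_cons, ih]
    by_cases h : p x <;> by_cases h' : q x <;> simp [h, h'] <;> ring

-- pigeonhole on 11 distinct integers in [0, 10]
theorem pv_len11 (l : List Int) (hn : l.Nodup) (hb : ∀ x ∈ l, 0 ≤ x ∧ x ≤ 10) :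
    l.length = 11 ↔ ∀ x : Int, 0 ≤ x → x ≤ 10 → x ∈ l := by
  have hcard : l.toFinset.card = l.length := List.toFinset_card_of_nodup hn
  have hsub : l.toFinset ⊆ Finset.Icc (0 : Int) 10 := by
    intro x hx
    rw [List.mem_toFinset] at hx
    have := hb x hx
    rw [Finset.mem_Icc]; omega
  have hIcc : (Finset.Icc (0 : Int) 10).card = 11 := by rw [Int.card_Icc]; rfl
  constructor
  · intro h x h0 h1
    have heq : l.toFinset = Finset.Icc (0 : Int) 10 :=
      Finset.eq_of_subset_of_card_le hsub (by omega)
    have : x ∈ l.toFinset := heq ▸ (Finset.mem_Icc.mpr ⟨h0, h1⟩)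
    rwa [List.mem_toFinset] at this
  · intro h
    have hsup : Finset.Icc (0 : Int) 10 ⊆ l.toFinset := by
      intro x hx
      rw [Finset.mem_Icc] at hx
      rw [List.mem_toFinset]
      exact h x hx.1 hx.2
    have := Finset.Subset.antisymm hsub hsup
    rw [← hcard, this, hIcc]

-- a row index r (0 ≤ r ≤ 10) is counted 11 times in B iff the row is filled in K
theorem pv_row_count (K : List (Int × Int)) (hK : K.Nodup) (r : Int)
    (hr0 : 0 ≤ r) (hr1 : r ≤ 10) :
    (((K.filter pvInb).map Prod.snd).count r = 11)
      ↔ ∀ x : Int, 0 ≤ x → x ≤ 10 → (x, r) ∈ K := by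
  classical
  set G := K.filter (fun k => pvInb k && (k.2 == r)) with hG
  have hcount : ((K.filter pvInb).map Prod.snd).count r = G.length := by
    rw [List.count, List.countP_map, List.countP_filter, List.countP_eq_length_filter, hG]
    congr 1
    apply List.filter_congr
    intro k _
    simp [Function.comp, pvInb, Bool.and_comm]
  have hGmem : ∀ k ∈ G, ((0 ≤ k.1 ∧ k.1 ≤ 10) ∧ k.2 = r) := by
    intro k hk
    rw [hG, List.mem_filter] at hk
    have := hk.2
    simp [pvInb] at this
    exact ⟨this.1.1, this.2⟩
  have hGn : G.Nodup := hK.filter _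
  have hmn : (G.map Prod.fst).Nodup := by
    apply List.Nodup.map_on _ hGn
    intro p hp q hq hpq
    have h1 := (hGmem p hp).2
    have h2 := (hGmem q hq).2
    exact Prod.ext hpq (h1.trans h2.symm)
  have hmb : ∀ x ∈ G.map Prod.fst, 0 ≤ x ∧ x ≤ 10 := by
    intro x hx
    rcases List.mem_map.mp hx with ⟨p, hp, rfl⟩
    exact (hGmem p hp).1
  have hlen : (G.map Prod.fst).length = G.length := List.length_map ..
  rw [hcount, ← hlen, pv_len11 _ hmn hmb]
  constructor
  · intro h x h0 h1
    rcases List.mem_map.mp (h x h0 h1) with ⟨p, hp, rfl⟩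
    have := (hGmem p hp).2
    have hpK : p ∈ K := (List.mem_filter.mp (hG ▸ hp)).1
    rwa [← this, Prod.mk.eta]
  · intro h x h0 h1
    apply List.mem_map.mpr
    refine ⟨(x, r), ?_, rfl⟩
    rw [hG, List.mem_filter]
    refine ⟨h x h0 h1, ?_⟩
    simp [pvInb]
    exact ⟨⟨h0, h1⟩, hr0, hr1⟩
-- and the symmetric fact for a column index
theorem pv_col_count (K : List (Int × Int)) (hK : K.Nodup) (c : Int)
    (hc0 : 0 ≤ c) (hc1 : c ≤ 10) :
    (((K.filter pvInb).map Prod.fst).count c = 11)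
      ↔ ∀ y : Int, 0 ≤ y → y ≤ 10 → (c, y) ∈ K := by
  classical
  set G := K.filter (fun k => pvInb k && (k.1 == c)) with hG
  have hcount : ((K.filter pvInb).map Prod.fst).count c = G.length := by
    rw [List.count, List.countP_map, List.countP_filter, List.countP_eq_length_filter, hG]
    congr 1
    apply List.filter_congr
    intro k _
    simp [Function.comp, pvInb, Bool.and_comm]
  have hGmem : ∀ k ∈ G, ((0 ≤ k.2 ∧ k.2 ≤ 10) ∧ k.1 = c) := by
    intro k hk
    rw [hG, List.mem_filter] at hk
    have := hk.2
    simp [pvInb] at this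
    exact ⟨this.1.2, this.2⟩
  have hGn : G.Nodup := hK.filter _
  have hmn : (G.map Prod.snd).Nodup := by
    apply List.Nodup.map_on _ hGn
    intro p hp q hq hpq
    have h1 := (hGmem p hp).2
    have h2 := (hGmem q hq).2
    exact Prod.ext (h1.trans h2.symm) hpq
  have hmb : ∀ y ∈ G.map Prod.snd, 0 ≤ y ∧ y ≤ 10 := by
    intro y hy
    rcases List.mem_map.mp hy with ⟨p, hp, rfl⟩
    exact (hGmem p hp).1
  have hlen : (G.map Prod.snd).length = G.length := List.length_map ..
  rw [hcount, ← hlen, pv_len11 _ hmn hmb]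
  constructor
  · intro h y h0 h1
    rcases List.mem_map.mp (h y h0 h1) with ⟨p, hp, rfl⟩
    have := (hGmem p hp).2
    have hpK : p ∈ K := (List.mem_filter.mp (hG ▸ hp)).1
    rwa [← this, Prod.mk.eta]
  · intro h y h0 h1
    apply List.mem_map.mpr
    refine ⟨(c, y), ?_, rfl⟩
    rw [hG, List.mem_filter]
    refine ⟨h y h0 h1, ?_⟩
    simp [pvInb]
    exact ⟨⟨hc0, hc1⟩, h0, h1⟩

-- B's counting fold splits into two per-axis counting folds over the in-grid keys
theorem pv_dict_pair (K : List (Int × Int)) :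
    K.foldl (fun (counts : PySem.Dict Int Int × PySem.Dict Int Int) k =>
        if (0 ≤ k.1 ∧ k.1 ≤ 10) ∧ (0 ≤ k.2 ∧ k.2 ≤ 10) then
          (counts.1.insert k.1 (counts.1.getD k.1 0 + 1),
           counts.2.insert k.2 (counts.2.getD k.2 0 + 1))
        else counts) (PySem.Dict.empty, PySem.Dict.empty)
      = (((K.filter pvInb).map Prod.fst).foldl
           (fun d x => d.insert x (d.getD x 0 + 1)) PySem.Dict.empty,
         ((K.filter pvInb).map Prod.snd).foldl
           (fun d x => d.insert x (d.getD x 0 + 1)) PySem.Dict.empty) := by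
  have hstep : (fun (counts : PySem.Dict Int Int × PySem.Dict Int Int) (k : Int × Int) =>
        if (0 ≤ k.1 ∧ k.1 ≤ 10) ∧ (0 ≤ k.2 ∧ k.2 ≤ 10) then
          (counts.1.insert k.1 (counts.1.getD k.1 0 + 1),
           counts.2.insert k.2 (counts.2.getD k.2 0 + 1))
        else counts)
      = (fun counts k =>
          ((if pvInb k then counts.1.insert k.1 (counts.1.getD k.1 0 + 1) else counts.1),
           (if pvInb k then counts.2.insert k.2 (counts.2.getD k.2 0 + 1) else counts.2))) := by
    funext counts k
    by_cases h : (0 ≤ k.1 ∧ k.1 ≤ 10) ∧ (0 ≤ k.2 ∧ k.2 ≤ 10) <;> simp [pvInb, h]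
  have h2 : (((K.filter pvInb).map Prod.fst).foldl
           (fun d x => d.insert x (d.getD x 0 + 1)) (PySem.Dict.empty : PySem.Dict Int Int),
         ((K.filter pvInb).map Prod.snd).foldl
           (fun d x => d.insert x (d.getD x 0 + 1)) (PySem.Dict.empty : PySem.Dict Int Int))
      = (K.foldl (fun d (k : Int × Int) => if pvInb k then d.insert k.1 (d.getD k.1 0 + 1) else d) PySem.Dict.empty,
         K.foldl (fun d (k : Int × Int) => if pvInb k then d.insert k.2 (d.getD k.2 0 + 1) else d) PySem.Dict.empty) := by
    rw [List.foldl_map, List.foldl_map, List.foldl_filter, List.foldl_filter]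
  rw [hstep, h2]
  exact PySem.List.foldl_prod_mk
    (fun (d : PySem.Dict Int Int) (k : Int × Int) => if pvInb k then d.insert k.1 (d.getD k.1 0 + 1) else d)
    (fun (d : PySem.Dict Int Int) (k : Int × Int) => if pvInb k then d.insert k.2 (d.getD k.2 0 + 1) else d)
    K PySem.Dict.empty PySem.Dict.empty

-- A's emptiness test for a row/column difference says: every cell of the line is filled
theorem pv_diff_empty (filled : List (Int × Int)) (line : List (Int × Int))
    (hn : line.Nodup) :
    (PySem.Set.len (PySem.Set.diff (PySem.Set.ofList line) filled) = 0)
      ↔ ∀ p ∈ line, p ∈ filled := by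
  rw [PySem.Set.ofList_eq_self_of_nodup _ hn]
  show ((List.length _ : Int) = 0) ↔ _
  rw [show PySem.Set.diff line filled = line.filter (fun x => !(PySem.Set.contains filled x)) from rfl]
  constructor
  · intro h p hp
    have hnil : line.filter (fun x => !(PySem.Set.contains filled x)) = [] := by
      have := List.length_eq_zero_iff.mp (by exact_mod_cast h)
      exact this
    by_contra hnot
    have : p ∈ line.filter (fun x => !(PySem.Set.contains filled x)) := by
      rw [List.mem_filter]
      refine ⟨hp, ?_⟩
      simp
      exact hnot
    rw [hnil] at this
    exact absurd this (List.not_mem_nil)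
  · intro h
    have : line.filter (fun x => !(PySem.Set.contains filled x)) = [] := by
      rw [List.filter_eq_nil_iff]
      intro p hp
      simp
      exact h p hp
    rw [this]
    rfl

theorem pv_line_nodup (f : Int → Int × Int) (hf : Function.Injective f) :
    ((PySem.List.pyRange 0 11 1).map f).Nodup := by
  apply List.Nodup.map hf
  decide

-- ===== VERDICT (by name: the statement is the Claim_ definition above) =====
theorem pv_main (K : List (Int × Int)) (hKn : K.Nodup) :
    ((PySem.List.pyRange 0 11 1).foldl (fun score col =>
        if PySem.Set.len (PySem.Set.diff
            (PySem.Set.ofList ((PySem.List.pyRange 0 11 1).map (fun y => (col, y)))) K) = 0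
        then score + 6 else score)
      ((PySem.List.pyRange 0 11 1).foldl (fun score row =>
        if PySem.Set.len (PySem.Set.diff
            (PySem.Set.ofList ((PySem.List.pyRange 0 11 1).map (fun x => (x, row)))) K) = 0
        then score + 6 else score) (0 : Int)))
    = (let counts := K.foldl (fun (counts : PySem.Dict Int Int × PySem.Dict Int Int) k =>
          if (0 ≤ k.1 ∧ k.1 ≤ 10) ∧ (0 ≤ k.2 ∧ k.2 ≤ 10) then
            (counts.1.insert k.1 (counts.1.getD k.1 0 + 1),
             counts.2.insert k.2 (counts.2.getD k.2 0 + 1))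
          else counts) (PySem.Dict.empty, PySem.Dict.empty)
       (PySem.List.pyRange 0 11 1).foldl (fun score i =>
         let score := if counts.2.getD i 0 = 11 then score + 6 else score
         if counts.1.getD i 0 = 11 then score + 6 else score) (0 : Int)) := by
  simp only []
  have hc1 : (K.foldl (fun (counts : PySem.Dict Int Int × PySem.Dict Int Int) k =>
      if (0 ≤ k.1 ∧ k.1 ≤ 10) ∧ (0 ≤ k.2 ∧ k.2 ≤ 10) then
        (counts.1.insert k.1 (counts.1.getD k.1 0 + 1),
         counts.2.insert k.2 (counts.2.getD k.2 0 + 1))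
      else counts) (PySem.Dict.empty, PySem.Dict.empty)).1
      = ((K.filter pvInb).map Prod.fst).foldl
          (fun d x => d.insert x (d.getD x 0 + 1)) PySem.Dict.empty := by
    rw [pv_dict_pair K]
  have hc2 : (K.foldl (fun (counts : PySem.Dict Int Int × PySem.Dict Int Int) k =>
      if (0 ≤ k.1 ∧ k.1 ≤ 10) ∧ (0 ≤ k.2 ∧ k.2 ≤ 10) then
        (counts.1.insert k.1 (counts.1.getD k.1 0 + 1),
         counts.2.insert k.2 (counts.2.getD k.2 0 + 1))
      else counts) (PySem.Dict.empty, PySem.Dict.empty)).2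
      = ((K.filter pvInb).map Prod.snd).foldl
          (fun d x => d.insert x (d.getD x 0 + 1)) PySem.Dict.empty := by
    rw [pv_dict_pair K]
  rw [pv_foldl_if6 (fun col => PySem.Set.len (PySem.Set.diff
        (PySem.Set.ofList ((PySem.List.pyRange 0 11 1).map (fun y => (col, y)))) K) = 0)]
  rw [pv_foldl_if6 (fun row => PySem.Set.len (PySem.Set.diff
        (PySem.Set.ofList ((PySem.List.pyRange 0 11 1).map (fun x => (x, row)))) K) = 0)]
  rw [pv_foldl_if6_pair]
  simp only [hc1, hc2]
  have hrow : (PySem.List.pyRange 0 11 1).countP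
        (fun row => decide (PySem.Set.len (PySem.Set.diff
          (PySem.Set.ofList ((PySem.List.pyRange 0 11 1).map (fun x => (x, row)))) K) = 0))
      = (PySem.List.pyRange 0 11 1).countP
        (fun i => decide ((((K.filter pvInb).map Prod.snd).foldl
            (fun (d : PySem.Dict Int Int) (x : Int) => d.insert x (d.getD x 0 + 1)) PySem.Dict.empty).getD i 0 = 11)) := by
    apply List.countP_congr
    intro r hr
    have hrb := PySem.List.mem_pyRange_one.mp hr
    simp only [decide_eq_true_eq]
    rw [pv_diff_empty K _ (pv_line_nodup _ (fun a b h => (Prod.ext_iff.mp h).1))]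
    rw [PySem.Dict.getD_foldl_insert_add_one, PySem.Dict.getD_empty]
    rw [show ((0 : Int) + (((K.filter pvInb).map Prod.snd).count r : Int) = 11)
          ↔ (((K.filter pvInb).map Prod.snd).count r = 11) by omega]
    rw [pv_row_count K hKn r (by omega) (by omega)]
    constructor
    · intro h x h0 h1
      exact h (x, r) (List.mem_map.mpr ⟨x, PySem.List.mem_pyRange_one.mpr ⟨h0, by omega⟩, rfl⟩)
    · intro h p hp
      rcases List.mem_map.mp hp with ⟨x, hx, rfl⟩
      have := PySem.List.mem_pyRange_one.mp hx
      exact h x this.1 (by omega)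
  have hcol : (PySem.List.pyRange 0 11 1).countP
        (fun col => decide (PySem.Set.len (PySem.Set.diff
          (PySem.Set.ofList ((PySem.List.pyRange 0 11 1).map (fun y => (col, y)))) K) = 0))
      = (PySem.List.pyRange 0 11 1).countP
        (fun i => decide ((((K.filter pvInb).map Prod.fst).foldl
            (fun (d : PySem.Dict Int Int) (x : Int) => d.insert x (d.getD x 0 + 1)) PySem.Dict.empty).getD i 0 = 11)) := by
    apply List.countP_congr
    intro c hc
    have hcb := PySem.List.mem_pyRange_one.mp hc
    simp only [decide_eq_true_eq]
    rw [pv_diff_empty K _ (pv_line_nodup _ (fun a b h => (Prod.ext_iff.mp h).2))]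
    rw [PySem.Dict.getD_foldl_insert_add_one, PySem.Dict.getD_empty]
    rw [show ((0 : Int) + (((K.filter pvInb).map Prod.fst).count c : Int) = 11)
          ↔ (((K.filter pvInb).map Prod.fst).count c = 11) by omega]
    rw [pv_col_count K hKn c (by omega) (by omega)]
    constructor
    · intro h y h0 h1
      exact h (c, y) (List.mem_map.mpr ⟨y, PySem.List.mem_pyRange_one.mpr ⟨h0, by omega⟩, rfl⟩)
    · intro h p hp
      rcases List.mem_map.mp hp with ⟨y, hy, rfl⟩
      have := PySem.List.mem_pyRange_one.mp hy
      exact h y this.1 (by omega)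
  rw [hrow, hcol]

theorem borderlands_spec : Claim_equal_borderlands := by
  intro ctt ttc _hdom
  show borderlands ctt ttc = borderlands_alt ctt ttc
  simp only [borderlands, borderlands_alt, PySem.List.dedup_eq_ofList]
  exact pv_main _ (PySem.Set.nodup_ofList _)
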